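-- pv_equiv track=rewrite | github.com/Kris465/MemoryBox | old_projects/RPO/block9/task158.py | unique_letters
-- ===== SOURCE A (Python) =====
-- def unique_letters(word1, word2):
--
--     result = []
--
--     for char in word1:
--         if char not in word2:
--             result.append(char)
--
--     for char in word2:
--         if char not in word1:
--             result.append(char)
--
--     return ''.join(sorted(result))
-- ===== SOURCE B (Python) =====
-- def unique_letters(word1, word2):
--     pool = list(word1) + list(word2)
--     parts = [c * pool.count(c) for c in sorted(set(word1) ^ set(word2))]
--     return ''.join(parts)
-- ===== Notes on version B (the rewrite author's own statement) =====
-- stated objective: alternative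
-- what changed: Instead of filtering each word against the other and sorting the collected multiset, B computes the symmetric difference of the two character sets, iterates its sorted distinct characters once, and emits each character repeated by its count in the combined pool, producing the result already in order with no multiset sort.
import Mathlib
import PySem

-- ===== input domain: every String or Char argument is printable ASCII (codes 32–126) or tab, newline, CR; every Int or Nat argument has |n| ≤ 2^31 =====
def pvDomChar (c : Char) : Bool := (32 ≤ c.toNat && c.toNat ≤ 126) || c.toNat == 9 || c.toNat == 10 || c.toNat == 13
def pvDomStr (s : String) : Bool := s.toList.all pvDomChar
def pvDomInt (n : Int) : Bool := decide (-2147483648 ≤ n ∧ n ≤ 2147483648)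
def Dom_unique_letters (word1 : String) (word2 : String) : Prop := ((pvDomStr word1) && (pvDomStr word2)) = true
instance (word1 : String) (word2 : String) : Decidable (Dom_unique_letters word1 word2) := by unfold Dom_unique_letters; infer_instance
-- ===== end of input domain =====

-- B replaces A's two filter scans + final multiset sort by counting: it walks the sorted
-- symmetric difference of the two character sets and repeats each character by its count
-- in the combined pool, so the output is built already sorted (alternative algorithm).

-- ===== PORT A =====
def unique_letters (word1 : String) (word2 : String) : String :=
  let result : List Char := []
  let result := word1.toList.foldl
    (fun acc c => if c ∉ word2.toList then acc ++ [c] else acc) result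
  let result := word2.toList.foldl
    (fun acc c => if c ∉ word1.toList then acc ++ [c] else acc) result
  String.ofList (PySem.List.sorted result (fun x => x) false)

-- ===== PORT B =====
def unique_letters_alt (word1 : String) (word2 : String) : String :=
  let pool : List Char := word1.toList ++ word2.toList
  let parts : List (List Char) :=
    (PySem.List.sorted
        (PySem.Set.symmDiff (PySem.Set.ofList word1.toList) (PySem.Set.ofList word2.toList))
        (fun x => x) false).map
      (fun c => PySem.List.pyRepeat [c] (PySem.List.count pool c))
  String.ofList (PySem.Chars.join [] parts)

-- ===== PRECONDITION & SPEC =====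
def Spec_unique_letters (word1 : String) (word2 : String) (out : String) : Prop := out = unique_letters_alt word1 word2
instance (word1 : String) (word2 : String) (out : String) : Decidable (Spec_unique_letters word1 word2 out) := by unfold Spec_unique_letters; infer_instance

-- ===== CLAIM (what is proved, stated in full; the proofs are below) =====
def Claim_equal_unique_letters : Prop := ∀ (word1 : String) (word2 : String), Dom_unique_letters word1 word2 → Spec_unique_letters word1 word2 (unique_letters word1 word2)

-- ===== LEMMAS AND PROOFS =====
-- ''.join(parts) with empty separator is concatenation.
theorem join_nil_eq_flatten (parts : List (List Char)) :
    PySem.Chars.join [] parts = parts.flatten := by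
  induction parts with
  | nil => simp [PySem.Chars.join_nil]
  | cons a rest ih =>
    cases rest with
    | nil => simp [PySem.Chars.join_singleton]
    | cons b t => simp [PySem.Chars.join_cons_cons, ih]

-- count of an element in a block-concatenation over distinct keys
theorem count_flatMap_replicate (keys : List Char) (n : Char → Nat) (a : Char)
    (hnd : keys.Nodup) :
    (keys.flatMap (fun c => List.replicate (n c) c)).count a
      = if a ∈ keys then n a else 0 := by
  induction keys with
  | nil => simp
  | cons k ks ih =>
    simp only [List.flatMap_cons, List.count_append, List.count_replicate]
    rcases List.nodup_cons.mp hnd with ⟨hk, hnd'⟩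
    by_cases hak : a = k
    · subst hak
      simp [ih hnd', hk]
    · simp [Ne.symm hak, hak, ih hnd']

-- a block-concatenation over strictly increasing keys is sorted
theorem pairwise_flatMap_replicate (keys : List Char) (n : Char → Nat)
    (h : keys.Pairwise (· < ·)) :
    (keys.flatMap (fun c => List.replicate (n c) c)).Pairwise (· ≤ ·) := by
  induction keys with
  | nil => simp
  | cons k ks ih =>
    rcases List.pairwise_cons.mp h with ⟨hk, h'⟩
    simp only [List.flatMap_cons]
    refine List.pairwise_append.mpr ⟨?_, ih h', ?_⟩
    · exact List.pairwise_replicate.mpr (Or.inr le_rfl)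
    · intro x hx y hy
      rcases List.mem_flatMap.mp hy with ⟨c, hc, hyc⟩
      rw [List.eq_of_mem_replicate hx, List.eq_of_mem_replicate hyc]
      exact le_of_lt (hk c hc)

-- count of an element in a filtered list, both cases
theorem count_filter_ite {p : Char → Bool} (a : Char) (l : List Char) :
    (l.filter p).count a = if p a then l.count a else 0 := by
  by_cases hpa : p a = true
  · simp [hpa, List.count_filter hpa]
  · have hnm : a ∉ l.filter p := fun hmem => hpa (List.of_mem_filter hmem)
    simp [hpa, List.count_eq_zero.mpr hnm]

-- ===== VERDICT (by name: the statement is the Claim_ definition above) =====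
theorem unique_letters_spec : Claim_equal_unique_letters := by
  intro w1 w2 _
  show unique_letters w1 w2 = unique_letters_alt w1 w2
  unfold unique_letters unique_letters_alt
  simp only [PySem.List.foldl_append_ite_eq_filter, List.nil_append,
    join_nil_eq_flatten, ← List.flatMap_def,
    PySem.List.pyRepeat_singleton, PySem.List.count_eq, Int.toNat_natCast]
  set l1 := w1.toList
  set l2 := w2.toList
  set keys := PySem.List.sorted
      (PySem.Set.symmDiff (PySem.Set.ofList l1) (PySem.Set.ofList l2)) (fun x => x) false
    with hkeys
  have hndsym : (PySem.Set.symmDiff (PySem.Set.ofList l1) (PySem.Set.ofList l2)).Nodup :=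
    PySem.Set.nodup_symmDiff _ _ (PySem.Set.nodup_ofList l1) (PySem.Set.nodup_ofList l2)
  have hperm0 := PySem.List.sorted_perm
      (PySem.Set.symmDiff (PySem.Set.ofList l1) (PySem.Set.ofList l2)) (fun x : Char => x) false
  have hnd : keys.Nodup := (List.Perm.nodup_iff hperm0).mpr hndsym
  have hmemkeys : ∀ a : Char, a ∈ keys ↔ (a ∈ l1 ∧ a ∉ l2) ∨ (a ∈ l2 ∧ a ∉ l1) := by
    intro a
    rw [hkeys, PySem.List.mem_sorted, PySem.Set.mem_symmDiff]
    simp [PySem.Set.mem_ofList]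
  have hlt : keys.Pairwise (· < ·) := by
    have hle : keys.Pairwise (fun a b : Char => a ≤ b) :=
      PySem.List.sorted_pairwise _ (fun x : Char => x)
    have hne : keys.Pairwise (fun a b : Char => a ≠ b) := hnd
    exact (hle.and hne).imp (fun h => lt_of_le_of_ne h.1 h.2)
  apply congrArg String.ofList
  apply PySem.List.sorted_id_eq_of_perm_of_pairwise
  · -- permutation, by counts
    refine List.perm_iff_count.mpr ?_
    intro a
    rw [count_flatMap_replicate keys _ a hnd]
    simp only [hmemkeys a, List.count_append, count_filter_ite]
    by_cases h1 : a ∈ l1 <;> by_cases h2 : a ∈ l2 <;>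
      simp [h1, h2, List.count_eq_zero.mpr]
  · exact pairwise_flatMap_replicate keys _ hlt
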